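-- pv_equiv track=rewrite | github.com/junhyuk1229/baekjoon-python | Problem solutions/3085.py | find_max_width
-- ===== SOURCE A (Python) =====
-- def find_max_width(input_map: list, check_col: int) -> int:
--     output_num = 0
--     comp_char = ''
--     temp_num = 0
--     for temp_index in range(len(input_map)):
--         if input_map[temp_index][check_col] != comp_char:
--             output_num = max(output_num, temp_num)
--             comp_char = input_map[temp_index][check_col]
--             temp_num = 1
--         else:
--             temp_num += 1
--     output_num = max(output_num, temp_num)
--     return output_num
-- ===== SOURCE B (Python) =====
-- def find_max_width(input_map: list, check_col: int) -> int:
--     col = [row[check_col] for row in input_map]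
--     best = 0
--     rest = col
--     while rest:
--         k = 1
--         while k < len(rest) and rest[k] == rest[0]:
--             k += 1
--         best = max(best, k)
--         rest = rest[k:]
--     return best
-- ===== Notes on version B (the rewrite author's own statement) =====
-- stated objective: alternative
-- what changed: Replaces A's single-pass comp_char/temp_num state machine (with the '' sentinel) by first extracting the column, then a two-level run-skipping loop: an inner scan measures each maximal run and an outer loop jumps to the next run via slicing.
import Mathlib
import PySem

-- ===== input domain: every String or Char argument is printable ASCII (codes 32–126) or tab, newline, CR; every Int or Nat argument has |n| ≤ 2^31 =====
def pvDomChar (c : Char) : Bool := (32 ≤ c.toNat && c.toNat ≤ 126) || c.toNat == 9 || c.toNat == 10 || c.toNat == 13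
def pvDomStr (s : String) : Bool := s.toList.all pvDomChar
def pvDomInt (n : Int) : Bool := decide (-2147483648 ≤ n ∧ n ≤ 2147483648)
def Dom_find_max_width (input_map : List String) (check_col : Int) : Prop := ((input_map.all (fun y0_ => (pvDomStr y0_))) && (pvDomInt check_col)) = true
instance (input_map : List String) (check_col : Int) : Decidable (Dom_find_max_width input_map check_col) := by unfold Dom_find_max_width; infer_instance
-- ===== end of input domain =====

-- B replaces A's comp_char/temp_num state machine by extracting the column and a
-- run-skipping two-level loop (inner scan measures a run, outer loop slices past it);
-- same cost, genuinely different control structure.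


-- ===== PORT A =====
-- comp_char is a Python string that is either '' (the initial sentinel) or a 1-char cell;
-- we model it as Option Char: none = '', some c = the 1-char string, with the exact
-- (in)equality behaviour ('' never equals a 1-char string).  A cell out of range
-- (Str.pyGet? = none = IndexError) is excluded by Pre_find_max_width.
def find_max_width (input_map : List String) (check_col : Int) : Int :=
  let st := (PySem.List.pyRange 0 (input_map.length : Int) 1).foldl
    (fun (s : Int × Option Char × Int) temp_index =>
      let cell := PySem.Str.pyGet? (PySem.List.pyGetD input_map temp_index "") check_col
      if cell ≠ s.2.1 then (max s.1 s.2.2, cell, 1)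
      else (s.1, s.2.1, s.2.2 + 1))
    (0, (none : Option Char), 0)
  max st.1 st.2.2

-- ===== PORT B =====
-- inner while loop: k = 1 + number of cells after the head equal to the head
def pvRunLen (c : Option Char) : List (Option Char) → Int
  | [] => 0
  | x :: xs => if x = c then 1 + pvRunLen c xs else 0

theorem pvRunLen_nonneg (c : Option Char) (l : List (Option Char)) : 0 ≤ pvRunLen c l := by
  induction l with
  | nil => simp [pvRunLen]
  | cons x xs ih => simp only [pvRunLen]; split <;> omega

-- outer while loop over the remaining slice `rest`, accumulator `best`;
-- rest[k:] with 0 ≤ k is exactly List.drop k.toNat (Python slices clamp)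
def pvAltLoop (best : Int) (rest : List (Option Char)) : Int :=
  match rest with
  | [] => best
  | c :: tl =>
    let k : Int := 1 + pvRunLen c tl
    pvAltLoop (max best k) ((c :: tl).drop k.toNat)
termination_by rest.length
decreasing_by
  have h := pvRunLen_nonneg c tl
  simp only [List.length_drop, List.length_cons]
  omega

def find_max_width_alt (input_map : List String) (check_col : Int) : Int :=
  let col := input_map.map (fun row => PySem.Str.pyGet? row check_col)
  pvAltLoop 0 col

-- ===== PRECONDITION & SPEC =====
-- Pre_ excludes exactly the inputs on which Python A raises IndexError
-- (some row shorter than the column index); B raises there too.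
def Pre_find_max_width (input_map : List String) (check_col : Int) : Prop :=
  ∀ row ∈ input_map, PySem.Raise.InRange row.toList.length check_col
instance (input_map : List String) (check_col : Int) : Decidable (Pre_find_max_width input_map check_col) := by unfold Pre_find_max_width; infer_instance

def pvWitness_find_max_width : List String × Int := (["ab", "cb", "cb"], 1)

def Spec_find_max_width (input_map : List String) (check_col : Int) (out : Int) : Prop := out = find_max_width_alt input_map check_col
instance (input_map : List String) (check_col : Int) (out : Int) : Decidable (Spec_find_max_width input_map check_col out) := by unfold Spec_find_max_width; infer_instance

-- ===== CLAIM (what is proved, stated in full; the proofs are below) =====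
def Claim_equal_find_max_width : Prop := ∀ (input_map : List String) (check_col : Int), Dom_find_max_width input_map check_col → Pre_find_max_width input_map check_col → Spec_find_max_width input_map check_col (find_max_width input_map check_col)

-- ===== LEMMAS AND PROOFS =====

-- A's loop body over an already-extracted cell
def pvStep (s : Int × Option Char × Int) (cell : Option Char) : Int × Option Char × Int :=
  if cell ≠ s.2.1 then (max s.1 s.2.2, cell, 1) else (s.1, s.2.1, s.2.2 + 1)

def pvFinish (s : Int × Option Char × Int) : Int := max s.1 s.2.2

-- the output accumulator only ever enters through max: it factors out of the fold
theorem pvFold_max_out (l : List (Option Char)) :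
    ∀ (out out' : Int) (comp : Option Char) (t : Int),
      pvFinish (l.foldl pvStep (max out out', comp, t)) =
        max out (pvFinish (l.foldl pvStep (out', comp, t))) := by
  induction l with
  | nil =>
      intro out out' comp t
      simp [pvFinish, List.foldl, max_assoc]
  | cons x xs ih =>
      intro out out' comp t
      simp only [List.foldl, pvStep]
      split
      · rw [max_assoc, ih]
      · exact ih out out' comp (t + 1)

theorem pvAltLoop_max_aux (n : Nat) :
    ∀ (l : List (Option Char)), l.length ≤ n →
      ∀ (b b' : Int), pvAltLoop (max b b') l = max b (pvAltLoop b' l) := by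
  induction n with
  | zero =>
      intro l hl b b'
      have : l = [] := List.eq_nil_of_length_eq_zero (Nat.le_zero.mp hl)
      subst this; simp [pvAltLoop]
  | succ m ih =>
      intro l hl b b'
      match l with
      | [] => simp [pvAltLoop]
      | c :: tl =>
          rw [pvAltLoop, pvAltLoop, max_assoc]
          have hr := pvRunLen_nonneg c tl
          have hlen : ((c :: tl).drop (1 + pvRunLen c tl).toNat).length ≤ m := by
            simp only [List.length_drop, List.length_cons]
            simp only [List.length_cons] at hl
            omega
          exact ih _ hlen b (max b' (1 + pvRunLen c tl))

theorem pvAltLoop_max (l : List (Option Char)) (b b' : Int) :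
    pvAltLoop (max b b') l = max b (pvAltLoop b' l) :=
  pvAltLoop_max_aux l.length l le_rfl b b'

theorem pvLe_altLoop (b : Int) (l : List (Option Char)) : b ≤ pvAltLoop b l := by
  have h : pvAltLoop (max b b) l = max b (pvAltLoop b l) := pvAltLoop_max l b b
  simp at h
  exact h

-- B on a nonempty column: the first maximal run against the rest
theorem pvAltLoop_cons (c : Option Char) (tl : List (Option Char)) :
    pvAltLoop 0 (c :: tl) =
      max (1 + pvRunLen c tl) (pvAltLoop 0 (tl.drop (pvRunLen c tl).toNat)) := by
  have hr := pvRunLen_nonneg c tl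
  rw [pvAltLoop]
  have h1 : (1 + pvRunLen c tl).toNat = (pvRunLen c tl).toNat + 1 := by omega
  rw [h1, List.drop_succ_cons, max_comm (0 : Int), pvAltLoop_max]

-- main invariant: A's fold from a fresh output accumulator, inside a run of `comp`
-- already `t` long, computes the merged first run against B on the remaining runs
theorem pvMain (l : List (Option Char)) :
    ∀ (comp : Option Char) (t : Int),
      pvFinish (l.foldl pvStep (0, comp, t)) =
        max (t + pvRunLen comp l) (pvAltLoop 0 (l.drop (pvRunLen comp l).toNat)) := by
  induction l with
  | nil => intro comp t; simp [pvFinish, pvRunLen, pvAltLoop, max_comm]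
  | cons x xs ih =>
      intro comp t
      by_cases hx : x = comp
      · have hstep : pvStep (0, comp, t) x = (0, comp, t + 1) := by simp [pvStep, hx]
        rw [List.foldl_cons, hstep, ih comp (t + 1)]
        have hr := pvRunLen_nonneg comp xs
        have hR : pvRunLen comp (x :: xs) = 1 + pvRunLen comp xs := by simp [pvRunLen, hx]
        rw [hR]
        have h1 : (1 + pvRunLen comp xs).toNat = (pvRunLen comp xs).toNat + 1 := by omega
        rw [h1, List.drop_succ_cons, show t + 1 + pvRunLen comp xs = t + (1 + pvRunLen comp xs) by ring]
      · have hstep : pvStep (0, comp, t) x = (max t 0, x, 1) := by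
          simp [pvStep, hx, max_comm]
        rw [List.foldl_cons, hstep, pvFold_max_out, ih x 1, ← pvAltLoop_cons]
        have hR : pvRunLen comp (x :: xs) = 0 := by simp [pvRunLen, hx]
        rw [hR]
        simp

-- A's indexed loop is the fold of pvStep over the extracted column
theorem pvA_eq (im : List String) (cc : Int) :
    find_max_width im cc =
      pvFinish ((im.map (fun row => PySem.Str.pyGet? row cc)).foldl pvStep
        (0, (none : Option Char), 0)) := by
  simp only [find_max_width, pvFinish]
  have hfun : (fun (s : Int × Option Char × Int) temp_index =>
      if PySem.Str.pyGet? (PySem.List.pyGetD im temp_index "") cc ≠ s.2.1 then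
        (max s.1 s.2.2, PySem.Str.pyGet? (PySem.List.pyGetD im temp_index "") cc, 1)
      else (s.1, s.2.1, s.2.2 + 1))
      = (fun (acc : Int × Option Char × Int) j =>
          pvStep acc (PySem.Str.pyGet? (PySem.List.pyGetD im j "") cc)) := rfl
  rw [hfun, PySem.List.foldl_pyRange_zero_pyGetD' im ""
        (fun s row => pvStep s (PySem.Str.pyGet? row cc)) (0, (none : Option Char), 0),
      List.foldl_map]

-- the two programs on the same column
theorem pvCol_eq (col : List (Option Char)) :
    pvFinish (col.foldl pvStep (0, (none : Option Char), 0)) = pvAltLoop 0 col := by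
  rw [pvMain col none 0]
  cases col with
  | nil => simp [pvRunLen, pvAltLoop]
  | cons x xs =>
      by_cases hx : x = (none : Option Char)
      · subst hx
        have hr := pvRunLen_nonneg (none : Option Char) xs
        have hR : pvRunLen none ((none : Option Char) :: xs) = 1 + pvRunLen none xs := by
          simp [pvRunLen]
        rw [hR]
        have h1 : (1 + pvRunLen (none : Option Char) xs).toNat
            = (pvRunLen (none : Option Char) xs).toNat + 1 := by omega
        rw [h1, List.drop_succ_cons, pvAltLoop_cons]
        simp
      · have hR : pvRunLen none (x :: xs) = 0 := by simp [pvRunLen, hx]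
        rw [hR]
        have hle := pvLe_altLoop 0 (x :: xs)
        simp only [Int.add_zero, Int.toNat_zero, List.drop_zero]
        omega

-- ===== VERDICT (by name: the statement is the Claim_ definition above) =====
theorem find_max_width_spec : Claim_equal_find_max_width := by
  intro im cc _ _
  unfold Spec_find_max_width find_max_width_alt
  rw [pvA_eq, pvCol_eq]
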